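-- pv_equiv track=rewrite | github.com/nmx/advent-of-code-2021 | day10/main.py | score_line
-- ===== SOURCE A (Python) =====
-- OPEN_TO_CLOSE = {
--     '(': ')',
--     '[': ']',
--     '{': '}',
--     '<': '>',
-- }
--
-- CORRUPT_POINT_MAP = {
--     ')': 3,
--     ']': 57,
--     '}': 1197,
--     '>': 25137,
-- }
--
-- AUTOCOMPLETE_POINT_MAP = {
--     ')': 1,
--     ']': 2,
--     '}': 3,
--     '>': 4,
-- }
--
-- def score_line(line):
--     # the expected closing characters for the open chunks
--     open_stack = []
--
--     for c in line.strip():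
--         if c in OPEN_TO_CLOSE:
--             open_stack.append(OPEN_TO_CLOSE[c])
--         elif c != open_stack.pop():
--             return CORRUPT_POINT_MAP[c], 0
--
--     autocomplete_score = 0
--     while open_stack:
--         autocomplete_score = (autocomplete_score * 5) + AUTOCOMPLETE_POINT_MAP[open_stack.pop()]
--     return 0, autocomplete_score
-- ===== SOURCE B (Python) =====
-- OPEN_TO_CLOSE = {
--     '(': ')',
--     '[': ']',
--     '{': '}',
--     '<': '>',
-- }
--
-- CORRUPT_POINT_MAP = {
--     ')': 3,
--     ']': 57,
--     '}': 1197,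
--     '>': 25137,
-- }
--
-- AUTOCOMPLETE_POINT_MAP = {
--     ')': 1,
--     ']': 2,
--     '}': 3,
--     '>': 4,
-- }
--
-- def score_line(line):
--     # One pass with no early exit: cancel every matched adjacent open/close pair,
--     # leaving the irreducible residue; then read both scores off the residue.
--     residue = []
--     for c in line.strip():
--         if residue and OPEN_TO_CLOSE.get(residue[-1]) == c:
--             residue.pop()
--         else:
--             residue.append(c)
--     # the leftmost surviving non-opener is the first mismatching closer of the scan
--     bad = next((c for c in residue if c not in OPEN_TO_CLOSE), None)
--     if bad is not None:
--         return CORRUPT_POINT_MAP[bad], 0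
--     # no closer survived: the residue is the unclosed openers, outermost first
--     score = 0
--     for c in reversed(residue):
--         score = score * 5 + AUTOCOMPLETE_POINT_MAP[OPEN_TO_CLOSE[c]]
--     return 0, score
-- ===== Notes on version B (the rewrite author's own statement) =====
-- stated objective: alternative
-- what changed: Instead of A's early-exit scan over a stack of expected closers, B cancels matched adjacent pairs in one pass with no early exit and then reads the corrupt score (leftmost surviving non-opener) or the autocomplete score (fold over the surviving openers) off the irreducible residue.
import Mathlib
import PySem

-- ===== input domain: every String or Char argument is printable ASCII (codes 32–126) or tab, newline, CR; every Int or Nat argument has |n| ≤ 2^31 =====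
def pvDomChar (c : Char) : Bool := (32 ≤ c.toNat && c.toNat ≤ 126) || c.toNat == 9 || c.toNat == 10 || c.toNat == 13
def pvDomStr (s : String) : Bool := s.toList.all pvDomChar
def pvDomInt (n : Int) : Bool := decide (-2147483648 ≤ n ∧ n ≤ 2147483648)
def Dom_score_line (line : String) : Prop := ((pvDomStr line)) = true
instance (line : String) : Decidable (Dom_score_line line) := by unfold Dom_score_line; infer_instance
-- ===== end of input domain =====

-- B replaces A's early-exit scan over a stack of expected closers by a one-pass
-- pair-cancellation producing the irreducible residue, from which both scores are read off
-- (objective: alternative decomposition, same O(n) cost).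

-- ===== PORT A =====
-- module constant OPEN_TO_CLOSE, as a lookup (dict.get / `in` membership)
def openToClose? (c : Char) : Option Char :=
  if c = '(' then some ')'
  else if c = '[' then some ']'
  else if c = '{' then some '}'
  else if c = '<' then some '>'
  else none

-- CORRUPT_POINT_MAP[c]; Python raises KeyError on other chars (those inputs are outside Pre_)
def corruptPoint (c : Char) : Int :=
  if c = ')' then 3
  else if c = ']' then 57
  else if c = '}' then 1197
  else if c = '>' then 25137
  else 0

-- AUTOCOMPLETE_POINT_MAP[c]; Python raises KeyError on other chars (outside Pre_)
def autoPoint (c : Char) : Int :=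
  if c = ')' then 1
  else if c = ']' then 2
  else if c = '}' then 3
  else if c = '>' then 4
  else 0

-- A's for-loop over the stripped line with open_stack (top at head); the final while-loop
-- is the foldl over the remaining stack, popping most recent first.
def aLoop : List Char → List Char → Int × Int
  | [], stack => (0, stack.foldl (fun acc e => acc * 5 + autoPoint e) 0)
  | c :: rest, stack =>
    match openToClose? c with
    | some cl => aLoop rest (cl :: stack)
    | none =>
      match stack with
      | [] => (0, 0)      -- Python: open_stack.pop() raises IndexError here (outside Pre_)
      | e :: st => if c = e then aLoop rest st else (corruptPoint c, 0)

def score_line (line : String) : Int × Int :=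
  aLoop (PySem.Str.strip line).toList []

-- ===== PORT B =====
-- c in OPEN_TO_CLOSE (dict membership)
def isKeyB (c : Char) : Bool := c = '(' || c = '[' || c = '{' || c = '<'

-- B's cancellation loop; Python's `residue` list is kept reversed (most recent at head),
-- so residue[-1] is the head and append/pop act on the head.
def residLoop : List Char → List Char → List Char
  | [], out => out
  | c :: rest, t :: out' =>
      if openToClose? t = some c then residLoop rest out' else residLoop rest (c :: t :: out')
  | c :: rest, [] => residLoop rest [c]

-- the post-processing after B's loop: residue in Python order is out.reverse,
-- reversed(residue) is out itself.
def postB (out : List Char) : Int × Int :=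
  match out.reverse.find? (fun c => !isKeyB c) with
  | some c => (corruptPoint c, 0)
  | none =>
      -- AUTOCOMPLETE_POINT_MAP[OPEN_TO_CLOSE[c]]; OPEN_TO_CLOSE[c] raises KeyError for
      -- non-openers (outside Pre_), ported as getD c
      (0, out.foldl (fun acc c => acc * 5 + autoPoint ((openToClose? c).getD c)) 0)

def score_line_alt (line : String) : Int × Int :=
  postB (residLoop (PySem.Str.strip line).toList [])

-- ===== PRECONDITION & SPEC =====
-- Pre_ excludes exactly the inputs on which Python A raises (IndexError: a closing/other
-- char while the stack is empty; KeyError: a non-bracket char scored as corrupt) — the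
-- standard recognizer for this context-free shape of the line; it excludes no input on
-- which A returns.
def preIsOpener (c : Char) : Bool := c = '(' || c = '[' || c = '{' || c = '<'
def preCloseOf (c : Char) : Char :=
  if c = '(' then ')' else if c = '[' then ']' else if c = '{' then '}'
  else if c = '<' then '>' else c
def preIsCloser (c : Char) : Bool := c = ')' || c = ']' || c = '}' || c = '>'

def safeScan : List Char → List Char → Bool
  | [], _ => true
  | c :: rest, opens =>
    if preIsOpener c then safeScan rest (c :: opens)
    else match opens with
      | [] => false                                  -- A would pop an empty stack
      | o :: os => if c = preCloseOf o then safeScan rest os else preIsCloser c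

def Pre_score_line (line : String) : Prop :=
  safeScan (PySem.Str.strip line).toList [] = true
instance (line : String) : Decidable (Pre_score_line line) := by
  unfold Pre_score_line; infer_instance

def pvWitness_score_line : String := "(<>]{"

def Spec_score_line (line : String) (out : Int × Int) : Prop := out = score_line_alt line
instance (line : String) (out : Int × Int) : Decidable (Spec_score_line line out) := by
  unfold Spec_score_line; infer_instance

-- ===== CLAIM (what is proved, stated in full; the proofs are below) =====
def Claim_equal_score_line : Prop :=
  ∀ (line : String), Dom_score_line line → Pre_score_line line →
    Spec_score_line line (score_line line)

-- ===== LEMMAS AND PROOFS =====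

theorem openToClose?_of_opener (c : Char) (h : preIsOpener c = true) :
    openToClose? c = some (preCloseOf c) := by
  simp only [preIsOpener, Bool.or_eq_true, decide_eq_true_eq] at h
  rcases h with ((h | h) | h) | h <;> subst h <;> rfl

theorem openToClose?_of_not_opener (c : Char) (h : preIsOpener c = false) :
    openToClose? c = none := by
  simp only [preIsOpener, Bool.or_eq_false_iff,
    decide_eq_false_iff_not] at h
  obtain ⟨⟨⟨h1, h2⟩, h3⟩, h4⟩ := h
  simp [openToClose?, h1, h2, h3, h4]

theorem isKeyB_eq (c : Char) : isKeyB c = preIsOpener c := rfl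

theorem closeOf_ne_of_openers (t c : Char) (ht : preIsOpener t = true)
    (hc : preIsOpener c = true) : preCloseOf t ≠ c := by
  simp only [preIsOpener, Bool.or_eq_true, decide_eq_true_eq] at ht hc
  rcases ht with ((h | h) | h) | h <;> subst h <;>
    rcases hc with ((h' | h') | h') | h' <;> subst h' <;> decide

-- L1: once a non-opening char is in the residue, everything at or below it survives.
theorem resid_below : ∀ (rest out : List Char) (c : Char) (opens : List Char),
    openToClose? c = none →
    ∃ tail, residLoop rest (out ++ c :: opens) = tail ++ c :: opens := by
  intro rest
  induction rest with
  | nil => intro out c opens _; exact ⟨out, rfl⟩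
  | cons d rest ih =>
    intro out c opens h
    match out with
    | [] =>
      have : residLoop (d :: rest) ([] ++ c :: opens)
          = if openToClose? c = some d then residLoop rest opens
            else residLoop rest (d :: c :: opens) := rfl
      rw [this, if_neg (by simp [h])]
      exact ih [d] c opens h
    | t :: out' =>
      have : residLoop (d :: rest) ((t :: out') ++ c :: opens)
          = if openToClose? t = some d then residLoop rest (out' ++ c :: opens)
            else residLoop rest (d :: t :: out' ++ c :: opens) := rfl
      rw [this]
      split
      · exact ih out' c opens h
      · exact ih (d :: t :: out') c opens h

theorem find_none_of_openers (l : List Char) (h : ∀ o ∈ l, preIsOpener o = true) :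
    l.find? (fun c => !isKeyB c) = none := by
  rw [List.find?_eq_none]
  intro x hx
  simp [isKeyB_eq, h x hx]

theorem foldl_auto_eq : ∀ (opens : List Char) (a : Int),
    (∀ o ∈ opens, preIsOpener o = true) →
    opens.foldl (fun acc c => acc * 5 + autoPoint ((openToClose? c).getD c)) a
      = opens.foldl (fun acc c => acc * 5 + autoPoint (preCloseOf c)) a := by
  intro opens
  induction opens with
  | nil => intro a _; rfl
  | cons o os ih =>
    intro a h
    simp only [List.foldl_cons]
    rw [openToClose?_of_opener o (h o (by simp)), Option.getD_some]
    exact ih _ (fun x hx => h x (by simp [hx]))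

-- L2: the main invariant relating A's scan (stack of expected closers) to B's
-- residue (the unmatched openers), on every safe line suffix.
theorem main_inv : ∀ (l opens : List Char),
    (∀ o ∈ opens, preIsOpener o = true) → safeScan l opens = true →
    aLoop l (opens.map preCloseOf) = postB (residLoop l opens) := by
  intro l
  induction l with
  | nil =>
    intro opens hop _
    show (0, _) = postB opens
    have hrev : ∀ o ∈ opens.reverse, preIsOpener o = true := by
      intro o ho; exact hop o (List.mem_reverse.mp ho)
    unfold postB
    rw [find_none_of_openers _ hrev]
    simp only [List.foldl_map]
    rw [foldl_auto_eq opens 0 hop]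
  | cons c rest ih =>
    intro opens hop hsafe
    by_cases hc : preIsOpener c = true
    · -- opener: both push
      have hA : aLoop (c :: rest) (opens.map preCloseOf)
          = aLoop rest (preCloseOf c :: opens.map preCloseOf) := by
        show (match openToClose? c with
          | some cl => aLoop rest (cl :: opens.map preCloseOf)
          | none => _) = _
        rw [openToClose?_of_opener c hc]
      have hsafe' : safeScan rest (c :: opens) = true := by
        simpa [safeScan, hc] using hsafe
      have hop' : ∀ o ∈ c :: opens, preIsOpener o = true := by
        intro o ho
        rcases List.mem_cons.mp ho with h | h
        · subst h; exact hc
        · exact hop o h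
      have hB : residLoop (c :: rest) opens = residLoop rest (c :: opens) := by
        match opens with
        | [] => rfl
        | t :: os =>
          have : residLoop (c :: rest) (t :: os)
              = if openToClose? t = some c then residLoop rest os
                else residLoop rest (c :: t :: os) := rfl
          rw [this, if_neg]
          rw [openToClose?_of_opener t (hop t (by simp))]
          simp only [Option.some.injEq]
          exact closeOf_ne_of_openers t c (hop t (by simp)) hc
      rw [hA, hB, show preCloseOf c :: opens.map preCloseOf = (c :: opens).map preCloseOf from rfl]
      exact ih (c :: opens) hop' hsafe'
    · -- not an opener
      rw [Bool.not_eq_true] at hc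
      have hnone := openToClose?_of_not_opener c hc
      cases opens with
      | nil =>
        exfalso
        have : safeScan (c :: rest) [] = false := by
          have : safeScan (c :: rest) ([] : List Char)
              = if preIsOpener c then safeScan rest [c] else false := rfl
          rw [this, if_neg (by simp [hc])]
        rw [this] at hsafe; exact Bool.false_ne_true hsafe
      | cons o os =>
        have hsafe' : safeScan (c :: rest) (o :: os)
            = if c = preCloseOf o then safeScan rest os else preIsCloser c := by
          have : safeScan (c :: rest) (o :: os)
              = if preIsOpener c then safeScan rest (c :: o :: os)
                else if c = preCloseOf o then safeScan rest os else preIsCloser c := rfl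
          rw [this, if_neg (by simp [hc])]
        rw [hsafe'] at hsafe
        have hA : aLoop (c :: rest) ((o :: os).map preCloseOf)
            = if c = preCloseOf o then aLoop rest (os.map preCloseOf)
              else (corruptPoint c, 0) := by
          show (match openToClose? c with
            | some cl => aLoop rest (cl :: (o :: os).map preCloseOf)
            | none =>
              match preCloseOf o :: os.map preCloseOf with
              | [] => (0, 0)
              | e :: st => if c = e then aLoop rest st else (corruptPoint c, 0)) = _
          rw [hnone]
        by_cases hm : c = preCloseOf o
        · -- matching close: A pops, B cancels
          rw [if_pos hm] at hsafe
          have hB : residLoop (c :: rest) (o :: os) = residLoop rest os := by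
            have : residLoop (c :: rest) (o :: os)
                = if openToClose? o = some c then residLoop rest os
                  else residLoop rest (c :: o :: os) := rfl
            rw [this, if_pos]
            rw [openToClose?_of_opener o (hop o (by simp)), hm]
          rw [hA, if_pos hm, hB]
          exact ih os (fun x hx => hop x (by simp [hx])) hsafe
        · -- mismatching close: A returns the corrupt score; B's residue keeps c as
          -- its leftmost non-opener
          have hcl : (!isKeyB c) = true := by simp [isKeyB_eq, hc]
          have hB : residLoop (c :: rest) (o :: os) = residLoop rest (c :: o :: os) := by
            have : residLoop (c :: rest) (o :: os)
                = if openToClose? o = some c then residLoop rest os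
                  else residLoop rest (c :: o :: os) := rfl
            rw [this, if_neg]
            rw [openToClose?_of_opener o (hop o (by simp))]
            simp only [Option.some.injEq]
            exact fun h => hm h.symm
          obtain ⟨tail, htail⟩ := resid_below rest [] c (o :: os) hnone
          rw [hA, if_neg hm, hB]
          show _ = postB (residLoop rest ([] ++ c :: o :: os))
          rw [htail]
          unfold postB
          have hrev : (tail ++ c :: o :: os).reverse
              = (o :: os).reverse ++ (c :: tail.reverse) := by
            simp
          rw [hrev, List.find?_append, find_none_of_openers ((o :: os).reverse)
            (fun x hx => hop x (List.mem_reverse.mp hx))]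
          simp [hcl]

-- ===== VERDICT (by name: the statement is the Claim_ definition above) =====
theorem score_line_spec : Claim_equal_score_line := by
  intro line _hdom hpre
  show score_line line = score_line_alt line
  unfold score_line score_line_alt
  exact main_inv (PySem.Str.strip line).toList [] (by intro o ho; cases ho) hpre
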